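-- pv_equiv track=rewrite | github.com/cindyLuo99/skim-Data-_15112 | TP3 skim(Data).py | sortBy1stNonZero
-- ===== SOURCE A (Python) =====
-- def find1stNonZeroIndex(row):
--     index = None
--     for i in range(len(row)):
--         if row[i] != 0:
--             index = i
--             break
--     return index
--
-- def sortBy1stNonZero(matrix, size, direction):
--     sortedMatrix = list()
--     result = dict()
--     for row in matrix:
--         if direction == "left":
--             index = find1stNonZeroIndex(row)
--         else:
--             index = find1stNonZeroIndex(row[size-1::-1]) # notice that the matrix is a block matrix
--         if index == None or index >= size: return None
--         elif index not in result:
--             result[index] = [row]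
--         else:
--             result[index].append(row)
--     if direction == "left":
--         sortedResult = sorted(result)
--     else: sortedResult = sorted(result)[::-1]
--     for key in sortedResult:
--         value = result[key]
--         for row in value:
--             sortedMatrix.append(row)
--     return sortedMatrix
-- ===== SOURCE B (Python) =====
-- def find1stNonZeroIndex(row):
--     index = None
--     for i in range(len(row)):
--         if row[i] != 0:
--             index = i
--             break
--     return index
--
-- def sortBy1stNonZero(matrix, size, direction):
--     keys = []
--     for row in matrix:
--         if direction == "left":
--             index = find1stNonZeroIndex(row)
--         else:
--             index = find1stNonZeroIndex(row[size-1::-1])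
--         if index == None or index >= size:
--             return None
--         keys.append(index)
--     decorated = sorted(zip(keys, matrix), key=lambda p: p[0],
--                        reverse=(direction != "left"))
--     return [row for _, row in decorated]
-- ===== Notes on version B (the rewrite author's own statement) =====
-- stated objective: simpler
-- what changed: Replaces the dict-of-lists bucketing plus sorted-keys concatenation pass with a single decorate-sort-undecorate stable sort of (key,row) pairs, using reverse=True for the right direction instead of reversing the sorted key list.
import Mathlib
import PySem

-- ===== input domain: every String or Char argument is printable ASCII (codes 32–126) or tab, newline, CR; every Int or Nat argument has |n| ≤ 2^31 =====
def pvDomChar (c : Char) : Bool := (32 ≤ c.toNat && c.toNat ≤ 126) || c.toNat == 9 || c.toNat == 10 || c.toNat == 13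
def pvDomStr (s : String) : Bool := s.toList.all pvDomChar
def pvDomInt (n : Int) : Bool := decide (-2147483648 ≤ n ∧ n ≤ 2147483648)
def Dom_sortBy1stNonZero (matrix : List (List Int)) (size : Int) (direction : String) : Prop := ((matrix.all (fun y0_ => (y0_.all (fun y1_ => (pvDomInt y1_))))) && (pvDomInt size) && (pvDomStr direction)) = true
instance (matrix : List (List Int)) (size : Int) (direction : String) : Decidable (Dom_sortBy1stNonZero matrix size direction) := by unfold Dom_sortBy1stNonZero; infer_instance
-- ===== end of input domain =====

-- B replaces A's dict-of-lists bucketing + sorted-keys concatenation by one stable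
-- decorate-sort-undecorate pass (objective: simpler); return values proved equal everywhere.

-- ===== PORT A =====
-- helper find1stNonZeroIndex: 'for i in range(len(row)): if row[i] != 0: index = i; break'
def findAux : List Int → Int → Option Int
  | [], _ => none
  | x :: xs, i => if x ≠ 0 then some i else findAux xs (i + 1)

def find1stNonZeroIndex (row : List Int) : Option Int := findAux row 0

-- the direction-aware key of a row; 'row[size-1::-1]' is PySem.List.slice? with step -1,
-- which is always 'some' (step ≠ 0), hence the '.getD []' (never taken)
def rowKey (row : List Int) (size : Int) (direction : String) : Option Int :=
  if direction == "left" then find1stNonZeroIndex row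
  else find1stNonZeroIndex ((PySem.List.slice? row (some (size - 1)) none (-1)).getD [])

-- A's bucketing loop with its early 'return None'
def aLoop : List (List Int) → Int → String → PySem.Dict Int (List (List Int)) → Option (PySem.Dict Int (List (List Int)))
  | [], _, _, result => some result
  | row :: rest, size, direction, result =>
    match rowKey row size direction with
    | none => none
    | some index =>
      if index ≥ size then none
      else if !(result.contains index) then aLoop rest size direction (result.insert index [row])
      else aLoop rest size direction (result.modify index [] (fun v => v ++ [row]))

def sortBy1stNonZero (matrix : List (List Int)) (size : Int) (direction : String) : Option (List (List Int)) :=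
  match aLoop matrix size direction PySem.Dict.empty with
  | none => none
  | some result =>
    let sortedResult := if direction == "left" then PySem.List.sorted result.keys (fun k => k)
                        else (PySem.List.sorted result.keys (fun k => k)).reverse  -- sorted(result)[::-1]
    some (sortedResult.foldl (fun acc key => (result.getD key []).foldl (fun acc2 row => acc2 ++ [row]) acc) [])

-- ===== PORT B =====
-- B's key-collecting loop with the same early 'return None'
def altKeys : List (List Int) → Int → String → List Int → Option (List Int)
  | [], _, _, keys => some keys
  | row :: rest, size, direction, keys =>
    match rowKey row size direction with
    | none => none
    | some index =>
      if index ≥ size then none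
      else altKeys rest size direction (keys ++ [index])

def sortBy1stNonZero_alt (matrix : List (List Int)) (size : Int) (direction : String) : Option (List (List Int)) :=
  match altKeys matrix size direction [] with
  | none => none
  | some keys =>
    some ((PySem.List.sorted (keys.zip matrix) (fun p => p.1) (!(direction == "left"))).map (fun p => p.2))

-- ===== PRECONDITION & SPEC =====
def Spec_sortBy1stNonZero (matrix : List (List Int)) (size : Int) (direction : String) (out : Option (List (List Int))) : Prop := out = sortBy1stNonZero_alt matrix size direction
instance (matrix : List (List Int)) (size : Int) (direction : String) (out : Option (List (List Int))) : Decidable (Spec_sortBy1stNonZero matrix size direction out) := by unfold Spec_sortBy1stNonZero; infer_instance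

-- ===== CLAIM (what is proved, stated in full; the proofs are below) =====
def Claim_equal_sortBy1stNonZero : Prop := ∀ (matrix : List (List Int)) (size : Int) (direction : String), Dom_sortBy1stNonZero matrix size direction → Spec_sortBy1stNonZero matrix size direction (sortBy1stNonZero matrix size direction)

-- ===== LEMMAS AND PROOFS =====

-- the common key list both loops compute (proof-side specification)
def keysOf : List (List Int) → Int → String → Option (List Int)
  | [], _, _ => some []
  | row :: rest, size, direction =>
    match rowKey row size direction with
    | none => none
    | some index =>
      if index ≥ size then none
      else (keysOf rest size direction).map (index :: ·)

theorem altKeys_eq (rows : List (List Int)) (size : Int) (direction : String) :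
    ∀ acc, altKeys rows size direction acc = (keysOf rows size direction).map (acc ++ ·) := by
  induction rows with
  | nil => intro acc; simp [altKeys, keysOf]
  | cons row rest ih =>
    intro acc
    simp only [altKeys, keysOf]
    cases rowKey row size direction with
    | none => rfl
    | some index =>
      simp only
      by_cases h : index ≥ size
      · simp [h]
      · simp only [h, ih]
        cases keysOf rest size direction <;> simp

theorem aLoop_eq (rows : List (List Int)) (size : Int) (direction : String) :
    ∀ d, aLoop rows size direction d =
      (keysOf rows size direction).map
        (fun ks => (ks.zip rows).foldl (fun d p => d.modify p.1 [] (fun v => v ++ [p.2])) d) := by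
  induction rows with
  | nil => intro d; simp [aLoop, keysOf]
  | cons row rest ih =>
    intro d
    simp only [aLoop, keysOf]
    cases rowKey row size direction with
    | none => rfl
    | some index =>
      simp only
      by_cases h : index ≥ size
      · simp [h]
      · have hbranch :
            (if !(d.contains index) then aLoop rest size direction (d.insert index [row])
             else aLoop rest size direction (d.modify index [] (fun v => v ++ [row]))) =
            aLoop rest size direction (d.modify index [] (fun v => v ++ [row])) := by
          by_cases hc : d.contains index
          · simp [hc]
          · have hc' : d.contains index = false := by simpa using hc
            have hg : d.getD index [] = [] := PySem.Dict.getD_of_not_contains d [] hc'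
            simp [hc', PySem.Dict.modify, hg]
        rw [if_neg h, if_neg h, hbranch, ih]
        cases keysOf rest size direction with
        | none => rfl
        | some ks' => simp [List.zip_cons_cons, List.foldl_cons]

-- insertBy inserts x at the head when every element triggers 'before'
theorem insertBy_cons_of_forall {α : Type} (before : α → α → Bool) (x : α) (ys : List α)
    (h : ∀ y ∈ ys, before x y = true) :
    PySem.List.insertBy before x ys = x :: ys := by
  cases ys with
  | nil => rfl
  | cons y t => simp [PySem.List.insertBy, h y (by simp)]

-- insertBy skips a prefix none of whose elements trigger 'before'
theorem insertBy_append_of_forall_not {α : Type} (before : α → α → Bool) (x : α) (g ys : List α)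
    (h : ∀ y ∈ g, before x y = false) :
    PySem.List.insertBy before x (g ++ ys) = g ++ PySem.List.insertBy before x ys := by
  induction g with
  | nil => rfl
  | cons y t ih =>
    simp only [List.cons_append, PySem.List.insertBy, h y (by simp)]
    simp only [Bool.false_eq_true, if_neg, not_false_iff]
    rw [ih (fun z hz => h z (by simp [hz]))]

-- stable insertion into a key-grouped list: x lands at the end of its key's group
theorem insertBy_grouped {α : Type} (key : α → Int) (before : Int → Int → Bool)
    (hasym : ∀ a b, before a b = true → before b a = false) :
    ∀ (ks : List Int), ks.Pairwise (fun a b => before a b = true) →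
    ∀ (x : α), key x ∈ ks → ∀ (ps : List α),
    PySem.List.insertBy (fun a b => before (key a) (key b)) x
        (ks.flatMap (fun k => ps.filter (fun p => key p == k)))
      = ks.flatMap (fun k => (ps ++ [x]).filter (fun p => key p == k)) := by
  intro ks
  induction ks with
  | nil => intro _ x hx; simp at hx
  | cons k ks' ih =>
    intro hpw x hx ps
    have hk : ∀ b ∈ ks', before k b = true := (List.pairwise_cons.mp hpw).1
    have hpw' := (List.pairwise_cons.mp hpw).2
    have hirr : ∀ a, before a a = false := by
      intro a
      cases h : before a a
      · rfl
      · have h2 := hasym a a h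
        simp [h] at h2
    simp only [List.flatMap_cons, List.filter_append]
    by_cases hxk : key x = k
    · -- x joins group k; it passes the group (irrefl) and precedes everything after (hk)
      have hnot : ∀ y ∈ ps.filter (fun p => key p == k), before (key x) (key y) = false := by
        intro y hy
        have : key y = k := by simpa using (List.of_mem_filter hy)
        rw [hxk, this, hirr]
      rw [insertBy_append_of_forall_not _ _ _ _ hnot]
      have hall : ∀ y ∈ ks'.flatMap (fun k => ps.filter (fun p => key p == k)),
          before (key x) (key y) = true := by
        intro y hy
        obtain ⟨k', hk', hy'⟩ := List.mem_flatMap.mp hy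
        have : key y = k' := by simpa using (List.of_mem_filter hy')
        rw [hxk, this]; exact hk k' hk'
      rw [insertBy_cons_of_forall _ _ _ hall]
      have hkn : k ∉ ks' := fun hmem => by
        have := hk k hmem; rw [hirr] at this; cases this
      have htail : ks'.flatMap (fun k => ps.filter (fun p => key p == k) ++ [x].filter (fun p => key p == k))
          = ks'.flatMap (fun k => ps.filter (fun p => key p == k)) := by
        apply List.flatMap_congr
        intro k' hk'
        have hne : key x ≠ k' := by rw [hxk]; rintro rfl; exact hkn hk'
        have hb : (key x == k') = false := by simpa using hne
        simp [List.filter, hb]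
      rw [htail]
      have hb : (key x == k) = true := by simpa using hxk
      simp [List.filter, hb]
    · -- x belongs to a later group: skip group k and recurse
      have hx' : key x ∈ ks' := by
        cases List.mem_cons.mp hx with
        | inl h => exact absurd h hxk
        | inr h => exact h
      have hnot : ∀ y ∈ ps.filter (fun p => key p == k), before (key x) (key y) = false := by
        intro y hy
        have hyk : key y = k := by simpa using (List.of_mem_filter hy)
        rw [hyk]
        exact hasym _ _ (hk _ hx')
      rw [insertBy_append_of_forall_not _ _ _ _ hnot, ih hpw' x hx' ps]
      have hb : (key x == k) = false := by simpa using hxk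
      simp [List.filter, hb]

-- the stable sort of a list, grouped by any strictly-'before' key enumeration covering its keys
theorem foldl_insertBy_grouped {α : Type} (key : α → Int) (before : Int → Int → Bool)
    (hasym : ∀ a b, before a b = true → before b a = false)
    (ks : List Int) (hpw : ks.Pairwise (fun a b => before a b = true)) :
    ∀ (ps : List α), (∀ p ∈ ps, key p ∈ ks) →
    ps.foldl (fun acc x => PySem.List.insertBy (fun a b => before (key a) (key b)) x acc) []
      = ks.flatMap (fun k => ps.filter (fun p => key p == k)) := by
  intro ps
  induction ps using List.reverseRecOn with
  | nil => simp
  | append_singleton ps x ih =>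
    intro hc
    rw [List.foldl_append]
    simp only [List.foldl_cons, List.foldl_nil]
    rw [ih (fun p hp => hc p (by simp [hp]))]
    exact insertBy_grouped key before hasym ks hpw x (hc x (by simp)) ps

-- the ascending stable sort, grouped by the sorted distinct keys
theorem sorted_asc_grouped (ps : List (Int × List Int)) :
    PySem.List.sorted ps (fun p => p.1) false
      = (PySem.List.sorted (PySem.Set.ofList (ps.map (fun p => p.1))) (fun k => k) false).flatMap
          (fun k => ps.filter (fun p => p.1 == k)) := by
  rw [PySem.List.sorted_eq_foldl_insertBy]
  refine foldl_insertBy_grouped (fun p => p.1) (fun a b => decide (a < b)) ?_ _ ?_ ps ?_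
  · intro a b h; simp at h ⊢; omega
  · exact (PySem.List.sorted_ofList_pairwise_lt (ps.map (fun p => p.1))).imp
      (fun h => decide_eq_true h)
  · intro p hp
    rw [PySem.List.mem_sorted, PySem.Set.mem_ofList]
    exact List.mem_map_of_mem hp

-- the descending stable sort, grouped by the reversed sorted distinct keys
theorem sorted_desc_grouped (ps : List (Int × List Int)) :
    PySem.List.sorted ps (fun p => p.1) true
      = (PySem.List.sorted (PySem.Set.ofList (ps.map (fun p => p.1))) (fun k => k) false).reverse.flatMap
          (fun k => ps.filter (fun p => p.1 == k)) := by
  rw [PySem.List.sorted_rev_eq_foldl_insertBy]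
  refine foldl_insertBy_grouped (fun p => p.1) (fun a b => decide (b < a)) ?_ _ ?_ ps ?_
  · intro a b h; simp at h ⊢; omega
  · rw [List.pairwise_reverse]
    exact (PySem.List.sorted_ofList_pairwise_lt (ps.map (fun p => p.1))).imp
      (fun h => decide_eq_true h)
  · intro p hp
    rw [List.mem_reverse, PySem.List.mem_sorted, PySem.Set.mem_ofList]
    exact List.mem_map_of_mem hp

-- A's nested append-loops flatten to a flatMap
theorem outer_foldl (g : Int → List (List Int)) (ks : List Int) :
    ∀ acc, ks.foldl (fun acc k => (g k).foldl (fun a r => a ++ [r]) acc) acc = acc ++ ks.flatMap g := by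
  induction ks with
  | nil => intro acc; simp
  | cons k t ih =>
    intro acc
    rw [List.foldl_cons, PySem.List.foldl_append_singleton, ih, List.flatMap_cons,
      List.append_assoc]

-- ===== VERDICT (by name: the statement is the Claim_ definition above) =====
theorem sortBy1stNonZero_spec : Claim_equal_sortBy1stNonZero := by
  intro matrix size direction _
  unfold Spec_sortBy1stNonZero sortBy1stNonZero sortBy1stNonZero_alt
  rw [aLoop_eq matrix size direction, altKeys_eq matrix size direction]
  cases hks : keysOf matrix size direction with
  | none => rfl
  | some ks =>
    simp only [Option.map_some, List.nil_append]
    have hkeys :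
        ((ks.zip matrix).foldl (fun d p => d.modify p.1 [] (fun v => v ++ [p.2])) PySem.Dict.empty).keys
          = PySem.Set.ofList ((ks.zip matrix).map (fun p => p.1)) :=
      PySem.Dict.keys_foldl_modify_key (ks.zip matrix) (fun p => p.1) [] (fun _ p v => v ++ [p.2])
        PySem.Dict.empty
    have hgetD : ∀ k,
        ((ks.zip matrix).foldl (fun d p => d.modify p.1 [] (fun v => v ++ [p.2])) PySem.Dict.empty).getD k []
          = ((ks.zip matrix).filter (fun p => p.1 == k)).map (fun p => p.2) := by
      intro k
      have h := PySem.Dict.getD_foldl_modify_append (ks.zip matrix) PySem.Dict.empty k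
      simpa using h
    by_cases hdir : (direction == "left") = true
    · simp only [hdir, if_pos, Bool.not_true]
      rw [outer_foldl, sorted_asc_grouped, List.map_flatMap, hkeys]
      rw [List.nil_append]
      exact congrArg some (List.flatMap_congr (fun k _ => hgetD k))
    · have hdir' : (direction == "left") = false := by simpa using hdir
      simp only [hdir', Bool.not_false, if_neg, Bool.false_eq_true, not_false_iff]
      rw [outer_foldl, sorted_desc_grouped, List.map_flatMap, hkeys]
      rw [List.nil_append]
      exact congrArg some (List.flatMap_congr (fun k _ => hgetD k))
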